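-- pv_equiv track=rewrite | github.com/mjl1999/BlackJack | Me coding Blackjack.py | convert_aces
-- ===== SOURCE A (Python) =====
-- def convert_aces(hand):
--     if bust(hand):
--         for index in range(len(hand)):
--             if hand[index] == 11:
--                 hand[index] = 1
--                 if not bust(hand):
--                     return hand
--     return hand
--
-- def bust(hand):
--     if sum(hand) > 21:
--         return True
--     else:
--         return False
-- ===== SOURCE B (Python) =====
-- def convert_aces(hand):
--     total = sum(hand)
--     if total <= 21:
--         return hand
--     needed = (total - 21 + 9) // 10  # each 11->1 flip lowers the sum by exactly 10
--     for i, v in enumerate(hand):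
--         if needed <= 0:
--             break
--         if v == 11:
--             hand[i] = 1
--             needed -= 1
--     return hand
-- ===== Notes on version B (the rewrite author's own statement) =====
-- stated objective: alternative
-- what changed: Replaces A's flip-then-retest-the-whole-sum loop by computing the sum once, deriving the exact number of required 11->1 flips in closed form (ceil((total-21)/10)), and doing a single directed pass that flips that many leftmost 11s.
import Mathlib
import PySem

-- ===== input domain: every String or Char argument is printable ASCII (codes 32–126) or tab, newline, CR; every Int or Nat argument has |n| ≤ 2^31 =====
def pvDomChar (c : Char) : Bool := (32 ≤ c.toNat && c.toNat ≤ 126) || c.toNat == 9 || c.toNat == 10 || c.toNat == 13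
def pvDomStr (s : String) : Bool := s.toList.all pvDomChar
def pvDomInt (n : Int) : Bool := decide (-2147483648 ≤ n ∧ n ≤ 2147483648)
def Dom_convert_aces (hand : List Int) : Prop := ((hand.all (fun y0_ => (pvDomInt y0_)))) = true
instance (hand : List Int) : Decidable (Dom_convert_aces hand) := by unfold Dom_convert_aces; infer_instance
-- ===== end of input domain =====

-- B replaces A's flip-then-retest loop by one closed-form count of needed flips and a single
-- directed pass (objective: alternative). A mutates `hand` in place; the equivalence proved
-- here is about the returned value (B performs the same in-place mutation in Python).

-- ===== PORT A =====
def pvBust (hand : List Int) : Bool :=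
  if hand.sum > 21 then true else false

-- the `for index in range(len(hand))` loop with early return, state = (mutated hand, index)
def pvALoop (hand : List Int) (i : Nat) : List Int :=
  if h : i < hand.length then
    if hand[i] = 11 then
      let hand' := hand.set i 1
      if pvBust hand' = false then hand' else pvALoop hand' (i + 1)
    else pvALoop hand (i + 1)
  else hand
termination_by hand.length - i
decreasing_by all_goals (try rw [List.length_set]); omega

def convert_aces (hand : List Int) : List Int :=
  if pvBust hand then pvALoop hand 0 else hand

-- ===== PORT B =====
-- the single pass: flip the leftmost 11s while `needed` is positive
def pvFlip (needed : Int) : List Int → List Int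
  | [] => []
  | v :: rest =>
    if needed ≤ 0 then v :: rest
    else if v = 11 then 1 :: pvFlip (needed - 1) rest
    else v :: pvFlip needed rest

def convert_aces_alt (hand : List Int) : List Int :=
  let total := hand.sum
  if total ≤ 21 then hand
  else pvFlip (PySem.Int.floordiv (total - 21 + 9) 10) hand

-- ===== PRECONDITION & SPEC =====
def Spec_convert_aces (hand : List Int) (out : List Int) : Prop := out = convert_aces_alt hand
instance (hand : List Int) (out : List Int) : Decidable (Spec_convert_aces hand out) := by unfold Spec_convert_aces; infer_instance

-- ===== CLAIM (what is proved, stated in full; the proofs are below) =====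
def Claim_equal_convert_aces : Prop := ∀ (hand : List Int), Dom_convert_aces hand → Spec_convert_aces hand (convert_aces hand)

-- ===== LEMMAS AND PROOFS =====

lemma pvFlip_nonpos (n : Int) (l : List Int) (hn : n ≤ 0) : pvFlip n l = l := by
  cases l with
  | nil => rfl
  | cons v rest => simp [pvFlip, hn]

lemma pvFlip_cons_pos_ne (n v : Int) (rest : List Int) (hn : 0 < n) (hv : v ≠ 11) :
    pvFlip n (v :: rest) = v :: pvFlip n rest := by
  rw [pvFlip, if_neg (by omega), if_neg hv]

lemma pvFlip_cons_pos_ace (n : Int) (rest : List Int) (hn : 0 < n) :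
    pvFlip n (11 :: rest) = 1 :: pvFlip (n - 1) rest := by
  rw [pvFlip, if_neg (by omega), if_pos rfl]

-- A's loop from index i, on a still-busting hand, equals take i ++ the directed flip of drop i
-- with the closed-form count ((sum - 12) / 10 = ceil((sum - 21)/10)).
lemma pvALoop_eq (k : Nat) : ∀ (hand : List Int) (i : Nat), hand.length - i = k →
    21 < hand.sum →
    pvALoop hand i = hand.take i ++ pvFlip ((hand.sum - 12) / 10) (hand.drop i) := by
  induction k with
  | zero =>
    intro hand i hk hs
    have hle : hand.length ≤ i := by omega
    rw [pvALoop]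
    simp [Nat.not_lt.mpr hle, List.take_of_length_le hle, List.drop_of_length_le hle, pvFlip]
  | succ k ih =>
    intro hand i hk hs
    have hi : i < hand.length := by omega
    have hpos : (0:Int) < (hand.sum - 12) / 10 := by omega
    have hdrop : hand.drop i = hand[i] :: hand.drop (i + 1) :=
      (List.getElem_cons_drop hi).symm
    have hlen_t : (hand.take i).length = i := by
      simp [List.length_take, Nat.min_eq_left (le_of_lt hi)]
    rw [pvALoop]
    by_cases h11 : hand[i] = 11
    · have hset : hand.set i 1 = hand.take i ++ 1 :: hand.drop (i + 1) :=
        List.set_eq_take_cons_drop 1 hi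
      have hsum : (hand.set i 1).sum = hand.sum - 10 := by
        have h1 : hand.sum = (hand.take i).sum + (hand[i] :: hand.drop (i + 1)).sum := by
          rw [← List.sum_append, ← hdrop, List.take_append_drop]
        rw [h11] at h1
        rw [hset]
        simp at h1 ⊢
        omega
      by_cases hstop : hand.sum - 10 ≤ 21
      · -- conversion at i already brings the sum to ≤ 21: A returns here; needed = 1
        have hbust : pvBust (hand.set i 1) = false := by
          simp [pvBust, hsum]; omega
        have hn : (hand.sum - 12) / 10 = 1 := by omega
        simp only [hi, dif_pos, h11, if_pos, hbust]
        rw [hdrop, h11, hn, pvFlip_cons_pos_ace 1 _ (by omega)]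
        simp [pvFlip_nonpos, hset]
      · -- still busting: A recurses; needed decreases by exactly one
        have hbust : ¬ pvBust (hand.set i 1) = false := by
          simp [pvBust, hsum]; omega
        have hih := ih (hand.set i 1) (i + 1) (by simp [List.length_set]; omega) (by omega)
        have htake : (hand.set i 1).take (i + 1) = hand.take i ++ [1] := by
          rw [hset, List.take_append, hlen_t, List.take_of_length_le (by omega)]
          have h1 : i + 1 - i = 1 := by omega
          rw [h1]
          simp
        have hdrop' : (hand.set i 1).drop (i + 1) = hand.drop (i + 1) := by
          rw [hset, List.drop_append, hlen_t, List.drop_of_length_le (by omega)]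
          have h1 : i + 1 - i = 1 := by omega
          rw [h1]
          simp
        have hn' : ((hand.set i 1).sum - 12) / 10 = (hand.sum - 12) / 10 - 1 := by
          rw [hsum]; omega
        simp only [hi, dif_pos, h11, if_pos, if_neg hbust]
        rw [hih, hn', htake, hdrop', hdrop, h11,
          pvFlip_cons_pos_ace _ _ hpos]
        simp
    · -- hand[i] ≠ 11: skip, needed unchanged
      have hih := ih hand (i + 1) (by omega) hs
      have htake : hand.take (i + 1) = hand.take i ++ [hand[i]] :=
        (List.take_append_getElem hi).symm
      simp only [hi, dif_pos, if_neg h11]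
      rw [hih, hdrop, pvFlip_cons_pos_ne _ _ _ hpos h11, htake]
      simp only [List.append_assoc, List.singleton_append]

-- ===== VERDICT (by name: the statement is the Claim_ definition above) =====
theorem convert_aces_spec : Claim_equal_convert_aces := by
  unfold Claim_equal_convert_aces
  intro hand _
  unfold Spec_convert_aces convert_aces convert_aces_alt
  by_cases h : hand.sum ≤ 21
  · simp [pvBust, h, Int.not_lt.mpr h]
  · have hs : 21 < hand.sum := by omega
    have hfd : PySem.Int.floordiv (hand.sum - 21 + 9) 10 = (hand.sum - 12) / 10 := by
      rw [PySem.Int.floordiv_eq_ediv_of_pos (by norm_num)]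
      ring_nf
    simp only [pvBust, if_pos hs, if_neg h]
    rw [pvALoop_eq (hand.length) hand 0 (by omega) hs, hfd]
    simp
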